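-- pv_equiv track=rewrite | github.com/castlhoo/Chicago-Crime-Clustering-Analysis | mini_project_2.py | categorize_location
-- ===== SOURCE A (Python) =====
-- def categorize_location(desc):
--     desc = str(desc).lower()
--
--     if any(x in desc for x in ['residence', 'apartment', 'yard', 'porch', 'garage', 'vestibule', 'coach house', 'rooming house', 'cha hallway', 'cha apartment', 'cha play', 'cha parking', 'cha lobby', 'cha stairwell', 'cha elevator', 'cha breezeway', 'cha grounds']):
--         return 'RESIDENTIAL'
--     elif any(x in desc for x in ['store', 'shop', 'retail', 'restaurant', 'tavern', 'bar', 'motel', 'hotel', 'liquor store', 'gas station', 'atm', 'bank', 'funeral', 'laundry', 'cleaning', 'dealership', 'currency exchange', 'beauty salon', 'barber', 'appliance']):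
--         return 'COMMERCIAL'
--     elif any(x in desc for x in ['cta', 'station', 'platform', 'train', 'bus', 'taxi', 'vehicle', 'garage', 'parking lot', 'airport', 'delivery truck', 'ride share', 'expressway', 'tracks', 'highway', 'uber', 'lyft', 'transportation system', 'trolley']):
--         return 'TRANSPORT'
--     elif any(x in desc for x in ['street', 'sidewalk', 'park', 'property', 'alley', 'bridge', 'river', 'lake', 'forest', 'beach', 'lagoon', 'riverbank', 'lakefront', 'wooded', 'gangway', 'sewer', 'prairie']):
--         return 'PUBLIC'
--     elif any(x in desc for x in ['school', 'college', 'university', 'grammar school', 'high school', 'school yard', 'day care']):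
--         return 'EDUCATION'
--     elif any(x in desc for x in ['hospital', 'medical', 'dental', 'nursing', 'retirement', 'ymca', 'animal hospital', 'funeral']):
--         return 'MEDICAL'
--     elif any(x in desc for x in ['police', 'jail', 'lock-up', 'courthouse', 'government', 'fire station', 'federal', 'county']):
--         return 'GOVERNMENT'
--     elif any(x in desc for x in ['warehouse', 'factory', 'manufacturing', 'construction', 'trucking', 'appliance', 'cleaners', 'garage/auto', 'junk yard', 'loading dock']):
--         return 'INDUSTRIAL'
--     elif any(x in desc for x in ['club', 'athletic', 'pool', 'sports arena', 'bowling', 'movie', 'theater', 'lounge', 'banquet', 'gym']):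
--         return 'RECREATIONAL'
--     else:
--         return 'OTHER'
-- ===== SOURCE B (Python) =====
-- CATEGORIES = [
--     ('RESIDENTIAL', ['residence', 'apartment', 'yard', 'porch', 'garage', 'vestibule', 'coach house', 'rooming house', 'cha hallway', 'cha apartment', 'cha play', 'cha parking', 'cha lobby', 'cha stairwell', 'cha elevator', 'cha breezeway', 'cha grounds']),
--     ('COMMERCIAL', ['store', 'shop', 'retail', 'restaurant', 'tavern', 'bar', 'motel', 'hotel', 'liquor store', 'gas station', 'atm', 'bank', 'funeral', 'laundry', 'cleaning', 'dealership', 'currency exchange', 'beauty salon', 'barber', 'appliance']),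
--     ('TRANSPORT', ['cta', 'station', 'platform', 'train', 'bus', 'taxi', 'vehicle', 'garage', 'parking lot', 'airport', 'delivery truck', 'ride share', 'expressway', 'tracks', 'highway', 'uber', 'lyft', 'transportation system', 'trolley']),
--     ('PUBLIC', ['street', 'sidewalk', 'park', 'property', 'alley', 'bridge', 'river', 'lake', 'forest', 'beach', 'lagoon', 'riverbank', 'lakefront', 'wooded', 'gangway', 'sewer', 'prairie']),
--     ('EDUCATION', ['school', 'college', 'university', 'grammar school', 'high school', 'school yard', 'day care']),
--     ('MEDICAL', ['hospital', 'medical', 'dental', 'nursing', 'retirement', 'ymca', 'animal hospital', 'funeral']),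
--     ('GOVERNMENT', ['police', 'jail', 'lock-up', 'courthouse', 'government', 'fire station', 'federal', 'county']),
--     ('INDUSTRIAL', ['warehouse', 'factory', 'manufacturing', 'construction', 'trucking', 'appliance', 'cleaners', 'garage/auto', 'junk yard', 'loading dock']),
--     ('RECREATIONAL', ['club', 'athletic', 'pool', 'sports arena', 'bowling', 'movie', 'theater', 'lounge', 'banquet', 'gym']),
-- ]
-- NAMES = [cat for cat, _ in CATEGORIES]
-- # Priority rank of each keyword = index of the FIRST category listing it
-- # (built iterating categories from last to first so earlier categories overwrite).
-- RANK = {kw: r for r in range(len(CATEGORIES) - 1, -1, -1) for kw in CATEGORIES[r][1]}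
-- LENGTHS = sorted({len(kw) for kw in RANK})
--
-- def categorize_location(desc):
--     # Sliding-window dictionary scan: at each position of the lowered string,
--     # look up the window of each keyword length in the RANK hash and keep the
--     # minimum (highest-priority) rank seen; no per-keyword substring search.
--     desc = str(desc).lower()
--     best = len(NAMES)
--     for i in range(len(desc)):
--         for L in LENGTHS:
--             r = RANK.get(desc[i:i+L])
--             if r is not None and r < best:
--                 best = r
--     return NAMES[best] if best < len(NAMES) else 'OTHER'
-- ===== Notes on version B (the rewrite author's own statement) =====
-- stated objective: alternative
-- what changed: Instead of running a substring search for each of the 104 keywords per category in turn, B builds a keyword-to-priority hash once and slides a window over the input, looking up the window of each distinct keyword length at every position and keeping the minimum priority.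
import Mathlib
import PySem

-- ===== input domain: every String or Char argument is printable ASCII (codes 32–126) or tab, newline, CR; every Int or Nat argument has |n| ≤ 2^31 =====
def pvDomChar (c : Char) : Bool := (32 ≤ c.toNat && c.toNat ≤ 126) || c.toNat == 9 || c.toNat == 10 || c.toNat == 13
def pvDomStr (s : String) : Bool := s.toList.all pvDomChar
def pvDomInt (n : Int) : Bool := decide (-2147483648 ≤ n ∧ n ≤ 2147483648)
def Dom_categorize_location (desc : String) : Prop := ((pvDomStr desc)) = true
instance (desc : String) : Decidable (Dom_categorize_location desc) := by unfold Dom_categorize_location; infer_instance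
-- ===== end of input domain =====

-- B replaces A's 104 per-keyword substring searches by a sliding-window scan of the input:
-- a keyword→priority hash built once, looked up for the window of each keyword length at each
-- position, keeping the minimum priority (objective: alternative).

-- ===== PORT A =====
def pvKw_RESIDENTIAL : List String := ["residence", "apartment", "yard", "porch", "garage", "vestibule", "coach house", "rooming house", "cha hallway", "cha apartment", "cha play", "cha parking", "cha lobby", "cha stairwell", "cha elevator", "cha breezeway", "cha grounds"]
def pvKw_COMMERCIAL : List String := ["store", "shop", "retail", "restaurant", "tavern", "bar", "motel", "hotel", "liquor store", "gas station", "atm", "bank", "funeral", "laundry", "cleaning", "dealership", "currency exchange", "beauty salon", "barber", "appliance"]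
def pvKw_TRANSPORT : List String := ["cta", "station", "platform", "train", "bus", "taxi", "vehicle", "garage", "parking lot", "airport", "delivery truck", "ride share", "expressway", "tracks", "highway", "uber", "lyft", "transportation system", "trolley"]
def pvKw_PUBLIC : List String := ["street", "sidewalk", "park", "property", "alley", "bridge", "river", "lake", "forest", "beach", "lagoon", "riverbank", "lakefront", "wooded", "gangway", "sewer", "prairie"]
def pvKw_EDUCATION : List String := ["school", "college", "university", "grammar school", "high school", "school yard", "day care"]
def pvKw_MEDICAL : List String := ["hospital", "medical", "dental", "nursing", "retirement", "ymca", "animal hospital", "funeral"]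
def pvKw_GOVERNMENT : List String := ["police", "jail", "lock-up", "courthouse", "government", "fire station", "federal", "county"]
def pvKw_INDUSTRIAL : List String := ["warehouse", "factory", "manufacturing", "construction", "trucking", "appliance", "cleaners", "garage/auto", "junk yard", "loading dock"]
def pvKw_RECREATIONAL : List String := ["club", "athletic", "pool", "sports arena", "bowling", "movie", "theater", "lounge", "banquet", "gym"]

-- literal transliteration of A's if/elif chain of any(...) substring tests over desc.lower()
def categorize_location (desc : String) : String :=
  let d := PySem.Str.lower desc
  if (pvKw_RESIDENTIAL.any (fun x => PySem.Str.isIn x d)) then "RESIDENTIAL"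
  else if (pvKw_COMMERCIAL.any (fun x => PySem.Str.isIn x d)) then "COMMERCIAL"
  else if (pvKw_TRANSPORT.any (fun x => PySem.Str.isIn x d)) then "TRANSPORT"
  else if (pvKw_PUBLIC.any (fun x => PySem.Str.isIn x d)) then "PUBLIC"
  else if (pvKw_EDUCATION.any (fun x => PySem.Str.isIn x d)) then "EDUCATION"
  else if (pvKw_MEDICAL.any (fun x => PySem.Str.isIn x d)) then "MEDICAL"
  else if (pvKw_GOVERNMENT.any (fun x => PySem.Str.isIn x d)) then "GOVERNMENT"
  else if (pvKw_INDUSTRIAL.any (fun x => PySem.Str.isIn x d)) then "INDUSTRIAL"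
  else if (pvKw_RECREATIONAL.any (fun x => PySem.Str.isIn x d)) then "RECREATIONAL"
  else "OTHER"

-- ===== PORT B =====
-- B's module-level data: CATEGORIES, NAMES, the keyword→rank dict and the distinct keyword lengths
def pvCategories : List (String × List String) := [
  ("RESIDENTIAL", ["residence", "apartment", "yard", "porch", "garage", "vestibule", "coach house", "rooming house", "cha hallway", "cha apartment", "cha play", "cha parking", "cha lobby", "cha stairwell", "cha elevator", "cha breezeway", "cha grounds"]),
  ("COMMERCIAL", ["store", "shop", "retail", "restaurant", "tavern", "bar", "motel", "hotel", "liquor store", "gas station", "atm", "bank", "funeral", "laundry", "cleaning", "dealership", "currency exchange", "beauty salon", "barber", "appliance"]),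
  ("TRANSPORT", ["cta", "station", "platform", "train", "bus", "taxi", "vehicle", "garage", "parking lot", "airport", "delivery truck", "ride share", "expressway", "tracks", "highway", "uber", "lyft", "transportation system", "trolley"]),
  ("PUBLIC", ["street", "sidewalk", "park", "property", "alley", "bridge", "river", "lake", "forest", "beach", "lagoon", "riverbank", "lakefront", "wooded", "gangway", "sewer", "prairie"]),
  ("EDUCATION", ["school", "college", "university", "grammar school", "high school", "school yard", "day care"]),
  ("MEDICAL", ["hospital", "medical", "dental", "nursing", "retirement", "ymca", "animal hospital", "funeral"]),
  ("GOVERNMENT", ["police", "jail", "lock-up", "courthouse", "government", "fire station", "federal", "county"]),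
  ("INDUSTRIAL", ["warehouse", "factory", "manufacturing", "construction", "trucking", "appliance", "cleaners", "garage/auto", "junk yard", "loading dock"]),
  ("RECREATIONAL", ["club", "athletic", "pool", "sports arena", "bowling", "movie", "theater", "lounge", "banquet", "gym"])]

def pvNames : List String := pvCategories.map (fun p => p.1)

-- RANK = {kw: r for r in range(len(CATEGORIES)-1, -1, -1) for kw in CATEGORIES[r][1]}
-- (.getD ("", []) is a totality default: r always indexes pvCategories)
def pvRank : PySem.Dict String Int :=
  (PySem.List.pyRange ((pvCategories.length : Int) - 1) (-1) (-1)).foldl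
    (fun d r =>
      (((PySem.List.pyGet? pvCategories r).getD ("", [])).2).foldl (fun d kw => d.insert kw r) d)
    PySem.Dict.empty

-- LENGTHS = sorted({len(kw) for kw in RANK})
def pvLengths : List Int :=
  PySem.List.sorted (PySem.Set.ofList (pvRank.keys.map (fun kw => PySem.Str.len kw))) (fun x => x)

-- sliding-window minimum-rank scan over the lowered string
def categorize_location_alt (desc : String) : String :=
  let d := PySem.Str.lower desc
  let best := (PySem.List.pyRange 0 (PySem.Str.len d)).foldl
    (fun best i =>
      pvLengths.foldl
        (fun best L =>
          match pvRank.get? (PySem.Str.slice d (some i) (some (i + L))) with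
          | some r => if r < best then r else best
          | none => best)
        best)
    (pvNames.length : Int)
  if best < (pvNames.length : Int) then (PySem.List.pyGet? pvNames best).getD "OTHER" else "OTHER"

-- ===== PRECONDITION & SPEC =====
def Spec_categorize_location (desc : String) (out : String) : Prop := out = categorize_location_alt desc
instance (desc : String) (out : String) : Decidable (Spec_categorize_location desc out) := by unfold Spec_categorize_location; infer_instance

-- ===== CLAIM (what is proved, stated in full; the proofs are below) =====
def Claim_equal_categorize_location : Prop := ∀ (desc : String), Dom_categorize_location desc → Spec_categorize_location desc (categorize_location desc)

-- ===== LEMMAS AND PROOFS =====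

-- the category keyword list at rank r (CATEGORIES[r][1]) and the min-update step, proof-side names
def pvCatKws (r : Int) : List String := ((PySem.List.pyGet? pvCategories r).getD ("", [])).2

def pvMinStep : Int → Int → Int := fun best r => if r < best then r else best

def pvMatched (desc : String) (kws : List String) : Bool :=
  kws.any (fun kw => PySem.Str.isIn kw (PySem.Str.lower desc))

-- index of the first matched category (9 = none), mirroring A's chain
def pvFirst (desc : String) : Int :=
  if pvMatched desc (pvCatKws 0) then 0
  else if pvMatched desc (pvCatKws 1) then 1
  else if pvMatched desc (pvCatKws 2) then 2
  else if pvMatched desc (pvCatKws 3) then 3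
  else if pvMatched desc (pvCatKws 4) then 4
  else if pvMatched desc (pvCatKws 5) then 5
  else if pvMatched desc (pvCatKws 6) then 6
  else if pvMatched desc (pvCatKws 7) then 7
  else if pvMatched desc (pvCatKws 8) then 8
  else 9

-- concrete facts about the rank table (kernel-checked)
set_option maxHeartbeats 2000000 in
set_option maxRecDepth 100000 in
theorem pvF1 : ∀ p ∈ pvRank.items, 0 ≤ p.2 ∧ p.2 < 9 ∧ p.1 ∈ pvCatKws p.2 := by decide

set_option maxHeartbeats 2000000 in
set_option maxRecDepth 100000 in
theorem pvF2 : ∀ c ∈ PySem.List.pyRange 0 9, ∀ kw ∈ pvCatKws c,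
    pvRank.getD kw 9 ≤ c ∧ PySem.Str.len kw ∈ pvLengths ∧ kw.toList ≠ [] := by decide

set_option maxRecDepth 100000 in
theorem pvF3 : ∀ L ∈ pvLengths, 0 < L := by decide

-- the inner match-loop is a min-fold over the successful lookups
theorem pv_foldl_step {α : Type} (f : α → Option Int) (xs : List α) (b : Int) :
    xs.foldl (fun best x => match f x with | some r => if r < best then r else best | none => best) b
      = (xs.filterMap f).foldl pvMinStep b := by
  induction xs generalizing b with
  | nil => rfl
  | cons x xs ih =>
    simp only [List.foldl_cons, List.filterMap_cons]
    cases h : f x with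
    | none => exact ih b
    | some r => exact ih (pvMinStep b r)

theorem pv_foldl_min_le_init (ys : List Int) (b : Int) : ys.foldl pvMinStep b ≤ b := by
  induction ys generalizing b with
  | nil => simp
  | cons y ys ih =>
    simp only [List.foldl_cons]
    refine le_trans (ih _) ?_
    simp only [pvMinStep]; split_ifs <;> omega

theorem pv_foldl_min_le_mem (ys : List Int) (b r : Int) (h : r ∈ ys) : ys.foldl pvMinStep b ≤ r := by
  induction ys generalizing b with
  | nil => simp at h
  | cons y ys ih =>
    simp only [List.foldl_cons]
    rcases List.mem_cons.mp h with rfl | h'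
    · refine le_trans (pv_foldl_min_le_init _ _) ?_
      simp only [pvMinStep]; split_ifs <;> omega
    · exact ih _ h'

theorem pv_foldl_min_mem (ys : List Int) (b : Int) :
    ys.foldl pvMinStep b = b ∨ ys.foldl pvMinStep b ∈ ys := by
  induction ys generalizing b with
  | nil => simp
  | cons y ys ih =>
    simp only [List.foldl_cons]
    rcases ih (pvMinStep b y) with h | h
    · rw [h]; simp only [pvMinStep]
      split_ifs with hlt
      · right; exact List.mem_cons_self
      · left; rfl
    · right; exact List.mem_cons_of_mem _ h

-- soundness: every successful window lookup names a matched category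
theorem pv_bridge1 (desc : String) {i L r : Int} (hi : 0 ≤ i) (hL : L ∈ pvLengths)
    (h : pvRank.get? (PySem.Str.slice (PySem.Str.lower desc) (some i) (some (i + L))) = some r) :
    0 ≤ r ∧ r < 9 ∧ pvMatched desc (pvCatKws r) = true := by
  have hL0 : 0 < L := pvF3 L hL
  have hmem := PySem.Dict.mem_items_of_get?_eq_some pvRank h
  obtain ⟨hr0, hr9, hkw⟩ := pvF1 _ hmem
  refine ⟨hr0, hr9, ?_⟩
  unfold pvMatched
  rw [List.any_eq_true]
  refine ⟨_, hkw, ?_⟩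
  rw [PySem.Str.isIn_eq]
  rw [← PySem.Chars.exists_prefix_drop_iff_isIn]
  refine ⟨i.toNat, ?_⟩
  rw [PySem.Str.toList_slice, PySem.Chars.slice_eq_listSlice,
    PySem.List.slice_toNat (a := i) (b := i + L) _ hi (by omega)]
  exact List.take_prefix _ _

-- completeness: a matched category c yields a window lookup of rank ≤ c
theorem pv_bridge2 (desc : String) {c : Int} (hc0 : 0 ≤ c) (hc9 : c < 9)
    (h : pvMatched desc (pvCatKws c) = true) :
    ∃ i L r, 0 ≤ i ∧ i < PySem.Str.len (PySem.Str.lower desc) ∧ L ∈ pvLengths ∧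
      pvRank.get? (PySem.Str.slice (PySem.Str.lower desc) (some i) (some (i + L))) = some r ∧
      r ≤ c := by
  unfold pvMatched at h
  rw [List.any_eq_true] at h
  obtain ⟨kw, hkwmem, hin⟩ := h
  have hc : c ∈ PySem.List.pyRange 0 9 := PySem.List.mem_pyRange_one.mpr ⟨hc0, hc9⟩
  obtain ⟨hrank, hlen, hne⟩ := pvF2 c hc kw hkwmem
  rw [PySem.Str.isIn_eq, ← PySem.Chars.exists_prefix_drop_iff_isIn] at hin
  obtain ⟨j, hpre⟩ := hin
  have hj : j < (PySem.Str.lower desc).toList.length := by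
    by_contra hge
    push Not at hge
    rw [List.drop_eq_nil_of_le hge, List.prefix_nil] at hpre
    exact hne hpre
  obtain ⟨r, hG⟩ : ∃ r, pvRank.get? kw = some r := by
    cases hG : pvRank.get? kw with
    | none =>
      exfalso
      have := PySem.Dict.getD_eq_get?_getD pvRank kw 9
      rw [hG] at this
      simp only [Option.getD_none] at this
      omega
    | some r => exact ⟨r, rfl⟩
  have hrle : r ≤ c := by
    have := PySem.Dict.getD_eq_get?_getD pvRank kw 9
    rw [hG] at this
    simp only [Option.getD_some] at this
    omega
  refine ⟨(j : Int), PySem.Str.len kw, r, by omega, ?_, hlen, ?_, hrle⟩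
  · rw [PySem.Str.len_eq]
    exact_mod_cast hj
  · have hslice : PySem.Str.slice (PySem.Str.lower desc) (some (j : Int))
        (some ((j : Int) + PySem.Str.len kw)) = kw := by
      rw [← String.toList_inj, PySem.Str.toList_slice, PySem.Chars.slice_eq_listSlice,
        PySem.Str.len_eq, PySem.List.slice_natCast_add]
      exact (List.prefix_iff_eq_take.mp hpre).symm
    rw [hslice]
    exact hG

theorem pvFirst_le_nine (desc : String) : pvFirst desc ≤ 9 := by
  unfold pvFirst; split_ifs <;> omega

theorem pvFirst_le_of_matched (desc : String) {c : Int} (hc0 : 0 ≤ c) (hc9 : c < 9)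
    (h : pvMatched desc (pvCatKws c) = true) : pvFirst desc ≤ c := by
  unfold pvFirst
  interval_cases c <;> split_ifs <;> simp_all

theorem pvFirst_matched_or_nine (desc : String) :
    pvFirst desc = 9 ∨ (0 ≤ pvFirst desc ∧ pvFirst desc < 9 ∧ pvMatched desc (pvCatKws (pvFirst desc)) = true) := by
  unfold pvFirst
  split_ifs <;> simp_all

-- the scan's accumulator equals the first-matched index
theorem pv_best_eq (desc : String) :
    (PySem.List.pyRange 0 (PySem.Str.len (PySem.Str.lower desc))).foldl
      (fun best i =>
        pvLengths.foldl
          (fun best L =>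
            match pvRank.get? (PySem.Str.slice (PySem.Str.lower desc) (some i) (some (i + L))) with
            | some r => if r < best then r else best
            | none => best)
          best)
      ((pvNames.length : Int)) = pvFirst desc := by
  have hN : (pvNames.length : Int) = 9 := by norm_num [pvNames, pvCategories]
  rw [hN]
  rw [PySem.List.foldl_congr_mem _ _
      (fun b i => (pvLengths.filterMap
        (fun L => pvRank.get? (PySem.Str.slice (PySem.Str.lower desc) (some i) (some (i + L))))).foldl
        pvMinStep b) _
      (fun b i _ => pv_foldl_step _ _ _)]
  rw [← List.foldl_flatMap]
  apply le_antisymm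
  · rcases pvFirst_matched_or_nine desc with h9 | ⟨h0, h9, hm⟩
    · rw [h9]; exact pv_foldl_min_le_init _ _
    · obtain ⟨i, L, r, hi0, hin, hL, hget, hrle⟩ := pv_bridge2 desc h0 h9 hm
      refine le_trans (pv_foldl_min_le_mem _ _ r ?_) hrle
      exact List.mem_flatMap.mpr ⟨i, PySem.List.mem_pyRange_one.mpr ⟨hi0, hin⟩,
        List.mem_filterMap.mpr ⟨L, hL, hget⟩⟩
  · rcases pv_foldl_min_mem ((PySem.List.pyRange 0 (PySem.Str.len (PySem.Str.lower desc))).flatMap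
        (fun i => pvLengths.filterMap
          (fun L => pvRank.get? (PySem.Str.slice (PySem.Str.lower desc) (some i) (some (i + L)))))) 9
      with h | h
    · rw [h]; exact pvFirst_le_nine desc
    · obtain ⟨i, hiZ, hfi⟩ := List.mem_flatMap.mp h
      obtain ⟨L, hL, hget⟩ := List.mem_filterMap.mp hfi
      obtain ⟨hr0, hr9, hm⟩ := pv_bridge1 desc (PySem.List.mem_pyRange_one.mp hiZ).1 hL hget
      exact pvFirst_le_of_matched desc hr0 hr9 hm

-- ===== VERDICT (by name: the statement is the Claim_ definition above) =====
set_option maxHeartbeats 4000000 in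
set_option maxRecDepth 100000 in
theorem categorize_location_spec : Claim_equal_categorize_location := by
  intro desc _
  unfold Spec_categorize_location
  have hA : categorize_location desc =
      (if pvMatched desc (pvCatKws 0) then "RESIDENTIAL"
       else if pvMatched desc (pvCatKws 1) then "COMMERCIAL"
       else if pvMatched desc (pvCatKws 2) then "TRANSPORT"
       else if pvMatched desc (pvCatKws 3) then "PUBLIC"
       else if pvMatched desc (pvCatKws 4) then "EDUCATION"
       else if pvMatched desc (pvCatKws 5) then "MEDICAL"
       else if pvMatched desc (pvCatKws 6) then "GOVERNMENT"
       else if pvMatched desc (pvCatKws 7) then "INDUSTRIAL"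
       else if pvMatched desc (pvCatKws 8) then "RECREATIONAL"
       else "OTHER") := rfl
  have hB : categorize_location_alt desc =
      (if pvFirst desc < (pvNames.length : Int)
       then (PySem.List.pyGet? pvNames (pvFirst desc)).getD "OTHER" else "OTHER") := by
    simp only [categorize_location_alt]
    rw [pv_best_eq]
  rw [hA, hB]
  have hN9 : (pvNames.length : Int) = 9 := by norm_num [pvNames, pvCategories]
  rw [hN9]
  unfold pvFirst
  split_ifs <;> first | rfl | decide | omega
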